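-- pv_equiv track=rewrite | github.com/SelvorWhim/competitive | Codewars/GrabCsvColumns.py | csv_columns
-- ===== SOURCE A (Python) =====
-- def csv_columns(csv, indices):
--     rows = csv.split() # whitespace includes linebreak
--     num_cols = rows[0].count(',') + 1 if rows else 0
--     if all(i < 0 or i >= num_cols for i in indices): # if any invalid index
--         return ''
--     selected_rows = []
--     for row in rows:
--         row = row.split(',')
--         new_row = ','.join([row[i] for i in indices if i>=0 and i<num_cols])
--         selected_rows.append(new_row)
--     return '\n'.join(selected_rows)
--     '\n'.join(selected_rows)
-- ===== SOURCE B (Python) =====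
-- def csv_columns(csv, indices):
--     rows = csv.split()
--     num_cols = rows[0].count(',') + 1 if rows else 0
--     valid = [i for i in indices if 0 <= i < num_cols]
--     if not valid:
--         return ''
--     grid = [row.split(',') for row in rows]
--     # column-first: materialise each selected column, then transpose back
--     columns = [[grid[r][i] for r in range(len(rows))] for i in valid]
--     return '\n'.join(','.join(col[r] for col in columns) for r in range(len(rows)))
-- ===== Notes on version B (the rewrite author's own statement) =====
-- stated objective: alternative
-- what changed: B filters the valid indices once, materialises the selected columns column-first from a pre-split grid, then transposes back by row index, instead of A's per-row filter-and-join loop with an accumulator list.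
import Mathlib
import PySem

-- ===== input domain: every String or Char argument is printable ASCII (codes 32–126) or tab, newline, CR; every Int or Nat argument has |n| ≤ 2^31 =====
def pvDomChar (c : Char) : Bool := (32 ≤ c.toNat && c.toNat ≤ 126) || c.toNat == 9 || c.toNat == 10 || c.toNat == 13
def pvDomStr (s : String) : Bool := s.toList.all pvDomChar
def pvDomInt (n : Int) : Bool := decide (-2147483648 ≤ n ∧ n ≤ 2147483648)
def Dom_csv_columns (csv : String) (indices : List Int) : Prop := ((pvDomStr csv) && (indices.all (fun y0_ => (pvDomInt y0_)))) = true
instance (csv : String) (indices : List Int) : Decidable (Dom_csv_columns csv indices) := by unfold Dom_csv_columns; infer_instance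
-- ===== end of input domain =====

-- B keeps A's return value; the equivalence is about the return value (neither mutates its arguments).

-- ===== PORT A =====
-- A: split on whitespace, early '' if every index is invalid, then per row
-- filter the indices and join the picked fields, accumulating the output rows.
def csv_columns (csv : String) (indices : List Int) : String :=
  let rows := PySem.Str.split₀ csv
  let num_cols : Int := match rows with
    | [] => 0
    | r :: _ => (PySem.Str.count r "," : Int) + 1
  if indices.all (fun i => decide (i < 0 ∨ num_cols ≤ i)) then ""
  else
    let selected_rows := rows.foldl (fun acc row =>
      let fields := (PySem.Str.split? row ",").getD []
      let new_row := PySem.Str.join ","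
        ((indices.filter (fun i => decide (0 ≤ i ∧ i < num_cols))).map
          (fun i => (PySem.List.pyGet? fields i).getD ""))  -- row[i]; none = IndexError, excluded by Pre_
      acc ++ [new_row]) []
    PySem.Str.join "\n" selected_rows

-- ===== PORT B =====
-- B: filter the valid indices once, build the selected columns column-first
-- from a pre-split grid, then transpose back by row index.
def csv_columns_alt (csv : String) (indices : List Int) : String :=
  let rows := PySem.Str.split₀ csv
  let num_cols : Int := match rows with
    | [] => 0
    | r :: _ => (PySem.Str.count r "," : Int) + 1
  let valid := indices.filter (fun i => decide (0 ≤ i ∧ i < num_cols))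
  if valid = [] then ""
  else
    let grid := rows.map (fun row => (PySem.Str.split? row ",").getD [])
    let columns := valid.map (fun i =>
      (List.range rows.length).map (fun r => (PySem.List.pyGet? (grid.getD r []) i).getD ""))  -- grid[r][i]
    PySem.Str.join "\n"
      ((List.range rows.length).map (fun r =>
        PySem.Str.join "," (columns.map (fun col => col.getD r ""))))

-- ===== PRECONDITION & SPEC =====
-- Pre_ excludes exactly the ragged inputs on which Python A raises IndexError:
-- some whitespace-separated row has fewer comma fields than a selected (valid) index needs.
def Pre_csv_columns (csv : String) (indices : List Int) : Prop :=
  ∀ row ∈ PySem.Str.split₀ csv, ∀ i ∈ indices, 0 ≤ i →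
    i < (match PySem.Str.split₀ csv with
          | [] => (0 : Int)
          | r :: _ => (PySem.Str.count r "," : Int) + 1) →
    i < (((PySem.Str.split? row ",").getD []).length : Int)
instance (csv : String) (indices : List Int) : Decidable (Pre_csv_columns csv indices) := by unfold Pre_csv_columns; infer_instance
def pvWitness_csv_columns : String × List Int := ("a,b,c\nd,e,f", [2, 0])
def Spec_csv_columns (csv : String) (indices : List Int) (out : String) : Prop := out = csv_columns_alt csv indices
instance (csv : String) (indices : List Int) (out : String) : Decidable (Spec_csv_columns csv indices out) := by unfold Spec_csv_columns; infer_instance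

-- ===== CLAIM (what is proved, stated in full; the proofs are below) =====
def Claim_equal_csv_columns : Prop := ∀ (csv : String) (indices : List Int), Dom_csv_columns csv indices → Pre_csv_columns csv indices → Spec_csv_columns csv indices (csv_columns csv indices)

-- ===== LEMMAS AND PROOFS =====

-- ===== VERDICT (by name: the statement is the Claim_ definition above) =====
theorem guard_iff (nc : Int) (indices : List Int) :
    (indices.all (fun i => decide (i < 0 ∨ nc ≤ i)) = true) ↔
    (indices.filter (fun i => decide (0 ≤ i ∧ i < nc)) = []) := by
  simp only [List.all_eq_true, List.filter_eq_nil_iff, decide_eq_true_eq]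
  constructor <;> intro h i hi <;> have := h i hi <;> omega

-- A's accumulated row loop equals B's column-first build transposed back.
theorem body_eq (rows : List String) (valid : List Int) :
    rows.foldl (fun acc row => acc ++ [PySem.Str.join "," (valid.map (fun i => (PySem.List.pyGet? ((PySem.Str.split? row ",").getD []) i).getD ""))]) []
    = (List.range rows.length).map (fun r => PySem.Str.join ","
        ((valid.map (fun i => (List.range rows.length).map (fun r =>
            (PySem.List.pyGet? ((rows.map (fun row => (PySem.Str.split? row ",").getD [])).getD r []) i).getD ""))).map
          (fun col => col.getD r ""))) := by
  rw [PySem.List.foldl_append_singleton_eq_map, List.nil_append]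
  apply List.ext_getElem
  · simp
  · intro r h1 h2
    simp only [List.getElem_map, List.getElem_range, List.map_map]
    congr 1
    apply List.map_congr_left
    intro i _
    have hr : r < rows.length := by simpa using h1
    simp [List.getD_eq_getElem?_getD, List.getElem?_map, hr]

-- ===== VERDICT (by name: the statement is the Claim_ definition above) =====
theorem csv_columns_spec : Claim_equal_csv_columns := by
  intro csv indices _ _
  unfold Spec_csv_columns csv_columns csv_columns_alt
  simp only []
  generalize (match PySem.Str.split₀ csv with
    | [] => (0 : Int)
    | r :: _ => (PySem.Str.count r "," : Int) + 1) = nc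
  generalize PySem.Str.split₀ csv = rows
  by_cases hv : indices.filter (fun i => decide (0 ≤ i ∧ i < nc)) = []
  · rw [if_pos ((guard_iff nc indices).mpr hv), if_pos hv]
  · rw [if_neg (fun h => hv ((guard_iff nc indices).mp h)), if_neg hv]
    rw [body_eq]
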